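-- pv_equiv track=rewrite | github.com/epfllibrary/infoscience-imports | wos_client.py | _deduplicate_and_concat
-- ===== SOURCE A (Python) =====
-- def _deduplicate_and_concat(list_of_obj, key_to_dedup, key_to_concat):
--     result = []
--     seq_no_dict = {}
--
--     for item in list_of_obj:
--         seq_no = item[key_to_dedup]
--         if seq_no in seq_no_dict:
--             # Concatenate organizations if 'seq_no' is already in the dictionary
--             seq_no_dict[seq_no][key_to_concat] += "|" + item[key_to_concat]
--         elif seq_no != "{}":
--             # Add the current item to the result list and update the dictionary
--             result.append(item)
--             seq_no_dict[seq_no] = item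
--     return result
-- ===== SOURCE B (Python) =====
-- def _deduplicate_and_concat(list_of_obj, key_to_dedup, key_to_concat):
--     groups = {}
--     for item in list_of_obj:
--         key = item[key_to_dedup]
--         if key != "{}":
--             groups.setdefault(key, []).append(item)
--     result = []
--     for items in groups.values():
--         first = items[0]
--         if len(items) > 1:
--             first[key_to_concat] = "|".join(it[key_to_concat] for it in items)
--         result.append(first)
--     return result
-- ===== Notes on version B (the rewrite author's own statement) =====
-- stated objective: alternative
-- what changed: B first groups the items into a dict key->list of items (setdefault/append, skipping '{}'), then emits each group's first item, writing '|'.join of all collected concat values only for groups with more than one member, instead of A's single pass that appends to the result and string-concatenates in place on every duplicate; singleton groups are returned untouched, exactly as A leaves them.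
import Mathlib
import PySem

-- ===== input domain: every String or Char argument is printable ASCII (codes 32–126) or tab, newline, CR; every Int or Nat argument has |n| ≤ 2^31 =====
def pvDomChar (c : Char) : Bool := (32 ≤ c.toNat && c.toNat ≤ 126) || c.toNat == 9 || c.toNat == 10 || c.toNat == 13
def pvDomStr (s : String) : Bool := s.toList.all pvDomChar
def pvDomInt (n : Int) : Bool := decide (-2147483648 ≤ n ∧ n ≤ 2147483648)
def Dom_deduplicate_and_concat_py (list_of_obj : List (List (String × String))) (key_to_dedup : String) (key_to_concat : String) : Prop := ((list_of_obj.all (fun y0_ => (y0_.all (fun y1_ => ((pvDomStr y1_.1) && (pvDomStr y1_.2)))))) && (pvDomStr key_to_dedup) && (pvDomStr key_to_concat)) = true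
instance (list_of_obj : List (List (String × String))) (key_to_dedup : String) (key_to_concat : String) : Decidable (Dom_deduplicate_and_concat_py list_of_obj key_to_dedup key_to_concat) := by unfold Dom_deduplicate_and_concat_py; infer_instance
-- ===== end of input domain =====

-- B groups the items into a dict key -> list in one pass and then joins each duplicated group's
-- concat values once, instead of A's single pass with in-place string concatenation; equivalence is
-- about the RETURN value (both Pythons mutate the kept first-occurrence dicts in place on duplicated keys).

-- ===== PORT A =====

-- dict lookup item[k]: first match (Pre_ guarantees the key is present and item keys are unique,
-- so this is exactly the Python dict lookup; on a missing key Python raises KeyError — excluded by Pre_)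
def pvGet (item : List (String × String)) (k : String) : String :=
  match item.find? (fun p => p.1 == k) with
  | some p => p.2
  | none => ""

-- dict assignment item[k] = v: overwrite the first match in place, append if absent (Python semantics)
def pvSet : List (String × String) → String → String → List (String × String)
  | [], k, v => [(k, v)]
  | p :: rest, k, v => if p.1 == k then (p.1, v) :: rest else p :: pvSet rest k v

-- one iteration of A's loop; state = (keys of the items appended to result, seq_no_dict).
-- Python's result list holds ALIASES of the dicts stored in seq_no_dict (mutated by later '+='),
-- so the aliasing is modelled by keeping the result keys and reading the final dict at the end.
def pvStepA (key_to_dedup key_to_concat : String)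
    (st : List String × List (String × List (String × String))) (item : List (String × String)) :
    List String × List (String × List (String × String)) :=
  let seq := pvGet item key_to_dedup
  match st.2.find? (fun p => p.1 == seq) with
  | some _ =>
      (st.1, st.2.map (fun p => if p.1 == seq then
          (p.1, pvSet p.2 key_to_concat
                 (pvGet p.2 key_to_concat ++ "|" ++ pvGet item key_to_concat))
        else p))
  | none =>
      if seq == "{}" then st else (st.1 ++ [seq], st.2 ++ [(seq, item)])

def deduplicate_and_concat_py (list_of_obj : List (List (String × String))) (key_to_dedup : String) (key_to_concat : String) : List (List (String × String)) :=
  let st := list_of_obj.foldl (pvStepA key_to_dedup key_to_concat) ([], [])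
  st.1.map (fun k => match st.2.find? (fun p => p.1 == k) with
    | some p => p.2
    | none => [])

-- ===== PORT B =====

-- B's first pass: groups.setdefault(key, []).append(item) is exactly Dict.modify key [] (· ++ [item])
def pvGroupStep (key_to_dedup : String)
    (groups : PySem.Dict String (List (List (String × String))))
    (item : List (String × String)) : PySem.Dict String (List (List (String × String))) :=
  let key := pvGet item key_to_dedup
  if key == "{}" then groups
  else groups.modify key [] (fun l => l ++ [item])

-- B's second pass over groups.values(): items[0], conditionally overwritten with the joined values
def deduplicate_and_concat_py_alt (list_of_obj : List (List (String × String))) (key_to_dedup : String) (key_to_concat : String) : List (List (String × String)) :=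
  let groups := list_of_obj.foldl (pvGroupStep key_to_dedup) PySem.Dict.empty
  groups.values.map (fun items =>
    if items.length > 1 then
      pvSet (items.headD []) key_to_concat
        (PySem.Str.join "|" (items.map (fun it => pvGet it key_to_concat)))
    else items.headD [])

-- ===== PRECONDITION & SPEC =====

def pvHasKey (item : List (String × String)) (k : String) : Bool := item.any (fun p => p.1 == k)

-- Pre_ excludes exactly the inputs on which Python A raises KeyError — an item lacking key_to_dedup,
-- or an item lacking key_to_concat whose dedup value is not "{}" and occurs in more than one item
-- (A reads the concat key of every member of such a duplicated group) — and items whose association-list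
-- representation repeats a key, which correspond to no Python dict input.
def Pre_deduplicate_and_concat_py (list_of_obj : List (List (String × String))) (key_to_dedup : String) (key_to_concat : String) : Prop :=
  ∀ item ∈ list_of_obj,
    (item.map Prod.fst).Nodup ∧ pvHasKey item key_to_dedup = true ∧
      (pvGet item key_to_dedup ≠ "{}" →
        1 < list_of_obj.countP (fun it => pvGet it key_to_dedup == pvGet item key_to_dedup) →
        pvHasKey item key_to_concat = true)

instance (list_of_obj : List (List (String × String))) (key_to_dedup : String) (key_to_concat : String) : Decidable (Pre_deduplicate_and_concat_py list_of_obj key_to_dedup key_to_concat) := by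
  unfold Pre_deduplicate_and_concat_py; infer_instance

def pvWitness_deduplicate_and_concat_py : (List (List (String × String))) × String × String :=
  ([[("k", "a"), ("c", "x")], [("k", "a"), ("c", "y")], [("k", "{}"), ("c", "z")], [("k", "b")]], "k", "c")

def Spec_deduplicate_and_concat_py (list_of_obj : List (List (String × String))) (key_to_dedup : String) (key_to_concat : String) (out : List (List (String × String))) : Prop := out = deduplicate_and_concat_py_alt list_of_obj key_to_dedup key_to_concat
instance (list_of_obj : List (List (String × String))) (key_to_dedup : String) (key_to_concat : String) (out : List (List (String × String))) : Decidable (Spec_deduplicate_and_concat_py list_of_obj key_to_dedup key_to_concat out) := by unfold Spec_deduplicate_and_concat_py; infer_instance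

-- ===== CLAIM (what is proved, stated in full; the proofs are below) =====
def Claim_equal_deduplicate_and_concat_py : Prop := ∀ (list_of_obj : List (List (String × String))) (key_to_dedup : String) (key_to_concat : String), Dom_deduplicate_and_concat_py list_of_obj key_to_dedup key_to_concat → Pre_deduplicate_and_concat_py list_of_obj key_to_dedup key_to_concat → Spec_deduplicate_and_concat_py list_of_obj key_to_dedup key_to_concat (deduplicate_and_concat_py list_of_obj key_to_dedup key_to_concat)

-- ===== LEMMAS AND PROOFS =====

-- the value A keeps in seq_no_dict for a key, computed from B's collected group (B's per-group body)
def pvConv (kc : String) (items : List (List (String × String))) : List (String × String) :=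
  if items.length > 1 then
    pvSet (items.headD []) kc (PySem.Str.join "|" (items.map (fun it => pvGet it kc)))
  else items.headD []

-- loop invariant tying A's state to B's dict of groups
def pvInv (kc : String)
    (stA : List String × List (String × List (String × String)))
    (g : PySem.Dict String (List (List (String × String)))) : Prop :=
  stA.1 = g.items.map Prod.fst ∧
  stA.2 = g.items.map (fun p => (p.1, pvConv kc p.2)) ∧
  (g.items.map Prod.fst).Nodup ∧
  ∀ p ∈ g.items, p.2 ≠ [] ∧ p.1 ≠ "{}"

theorem pvFind?_map_fst {β γ : Type} (l : List (String × β)) (f : String × β → γ) (s : String) :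
    List.find? (fun q => q.1 == s) (l.map (fun p => (p.1, f p))) =
      (List.find? (fun p => p.1 == s) l).map (fun p => (p.1, f p)) := by
  induction l with
  | nil => rfl
  | cons a l ih =>
      by_cases h : a.1 = s
      · simp [List.find?, h]
      · simp only [List.map_cons, List.find?]
        rw [show ((a.1 == s) = false) from beq_eq_false_iff_ne.mpr h]
        simpa using ih

theorem pvGet_pvSet_same (l : List (String × String)) (k v : String) :
    pvGet (pvSet l k v) k = v := by
  induction l with
  | nil => simp [pvGet, pvSet]
  | cons a l ih =>
      by_cases h : a.1 = k
      · simp [pvGet, pvSet, h]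
      · have hb : (a.1 == k) = false := beq_eq_false_iff_ne.mpr h
        simpa [pvGet, pvSet, hb, List.find?] using ih

theorem pvSet_pvSet_same (l : List (String × String)) (k v w : String) :
    pvSet (pvSet l k v) k w = pvSet l k w := by
  induction l with
  | nil => simp [pvSet]
  | cons a l ih =>
      by_cases h : a.1 = k
      · simp [pvSet, h]
      · have hb : (a.1 == k) = false := beq_eq_false_iff_ne.mpr h
        simp [pvSet, hb, ih]

theorem pvChars_join_append (sep x : List Char) (l : List (List Char)) (h : l ≠ []) :
    PySem.Chars.join sep (l ++ [x]) = PySem.Chars.join sep l ++ sep ++ x := by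
  induction l with
  | nil => exact absurd rfl h
  | cons a l ih =>
      cases l with
      | nil => simp [PySem.Chars.join_cons_cons, PySem.Chars.join_singleton]
      | cons b l' =>
          have := ih (by simp)
          simp only [List.cons_append] at this ⊢
          rw [PySem.Chars.join_cons_cons, PySem.Chars.join_cons_cons, this]
          simp [List.append_assoc]

theorem pvJoin_singleton (v : String) : PySem.Str.join "|" [v] = v := by
  apply String.toList_inj.mp
  simp [PySem.Str.toList_join, PySem.Chars.join_singleton]

theorem pvJoin_append (vals : List String) (v : String) (h : vals ≠ []) :
    PySem.Str.join "|" (vals ++ [v]) = PySem.Str.join "|" vals ++ "|" ++ v := by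
  apply String.toList_inj.mp
  simp only [PySem.Str.toList_join, String.toList_append, List.map_append, List.map_cons,
    List.map_nil]
  exact pvChars_join_append _ _ _ (by simpa using h)

-- A's in-place '+=' on a stored group value corresponds to appending the new item to the group
theorem pvConv_snoc (kc : String) (items : List (List (String × String)))
    (item : List (String × String)) (h : items ≠ []) :
    pvSet (pvConv kc items) kc (pvGet (pvConv kc items) kc ++ "|" ++ pvGet item kc) =
      pvConv kc (items ++ [item]) := by
  match items with
  | [] => exact absurd rfl h
  | [f] =>
      have e1 : pvConv kc [f] = f := by simp [pvConv]
      have e2 : pvConv kc ([f] ++ [item]) =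
          pvSet f kc (PySem.Str.join "|" [pvGet f kc, pvGet item kc]) := by
        simp [pvConv]
      rw [e1, e2,
        show ([pvGet f kc, pvGet item kc] : List String) = [pvGet f kc] ++ [pvGet item kc] from rfl,
        pvJoin_append [pvGet f kc] _ (by simp), pvJoin_singleton]
  | f :: g :: rs =>
      simp only [pvConv, List.cons_append]
      rw [if_pos (by simp : (f :: g :: rs).length > 1),
        if_pos (by simp : (f :: g :: (rs ++ [item])).length > 1)]
      simp only [List.headD, List.map_cons, List.map_append, List.map_nil]
      rw [pvGet_pvSet_same, pvSet_pvSet_same,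
        show (pvGet f kc :: pvGet g kc :: (List.map (fun it => pvGet it kc) rs ++ [pvGet item kc]))
          = (pvGet f kc :: pvGet g kc :: List.map (fun it => pvGet it kc) rs) ++ [pvGet item kc]
          from rfl,
        pvJoin_append _ _ (by simp)]

theorem pvStep_inv (kd kc : String) (stA : List String × List (String × List (String × String)))
    (g : PySem.Dict String (List (List (String × String)))) (item : List (String × String))
    (h : pvInv kc stA g) : pvInv kc (pvStepA kd kc stA item) (pvGroupStep kd g item) := by
  obtain ⟨h1, h2, hnd, h3⟩ := h
  set seq := pvGet item kd with hseqdef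
  have hfindA : stA.2.find? (fun p => p.1 == seq) =
      (g.items.find? (fun p => p.1 == seq)).map (fun p => (p.1, pvConv kc p.2)) := by
    rw [h2]; exact pvFind?_map_fst _ _ _
  by_cases hbrace : seq = "{}"
  · -- key "{}": B skips; A's dict can never contain "{}", so A skips too
    have hnone : g.items.find? (fun p => p.1 == seq) = none := by
      apply List.find?_eq_none.mpr
      intro p hp
      rw [hbrace]
      simpa using (h3 p hp).2
    have hA : pvStepA kd kc stA item = stA := by
      have hnA : List.find? (fun p => p.1 == "{}") stA.2 = none := by
        rw [← hbrace, hfindA, hnone]; rfl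
      simp [pvStepA, ← hseqdef, hbrace, hnA]
    have hB : pvGroupStep kd g item = g := by
      simp [pvGroupStep, ← hseqdef, hbrace]
    rw [hA, hB]; exact ⟨h1, h2, hnd, h3⟩
  · have hbb : (seq == "{}") = false := beq_eq_false_iff_ne.mpr hbrace
    cases hf : g.items.find? (fun p => p.1 == seq) with
    | some q =>
        -- duplicate key: A concatenates in place, B appends the item to the stored group
        have hqmem : q ∈ g.items := List.mem_of_find?_eq_some hf
        have hq1 : q.1 = seq := by have := List.find?_some hf; simpa using this
        have hcont : g.contains seq = true := by
          simp only [PySem.Dict.contains]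
          exact List.any_eq_true.mpr ⟨q, hqmem, by simp [hq1]⟩
        have hknd : g.keys.Nodup := by
          simpa [PySem.Dict.keys] using hnd
        have hgetD : g.getD seq [] = q.2 := by
          have : (seq, q.2) ∈ g.items := by rw [← hq1]; exact hqmem
          exact PySem.Dict.getD_of_mem_items g this hknd []
        have hBitems : (pvGroupStep kd g item).items =
            g.items.map (fun p => if p.1 == seq then (seq, q.2 ++ [item]) else p) := by
          simp only [pvGroupStep, ← hseqdef, hbb, Bool.false_eq_true, if_false,
            PySem.Dict.modify, hgetD]
          exact PySem.Dict.items_insert_of_contains g _ hcont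
        have hA : pvStepA kd kc stA item =
            (stA.1, stA.2.map (fun p => if p.1 == seq then
              (p.1, pvSet p.2 kc (pvGet p.2 kc ++ "|" ++ pvGet item kc)) else p)) := by
          simp [pvStepA, ← hseqdef, hfindA, hf]
        have huniq : ∀ p ∈ g.items, p.1 = seq → p = q := by
          intro p hp hps
          exact List.inj_on_of_nodup_map hnd hp hqmem (by rw [hps, hq1])
        rw [hA]
        refine ⟨?_, ?_, ?_, ?_⟩
        · rw [h1, hBitems]
          simp only [List.map_map]
          apply List.map_congr_left
          intro p hp
          by_cases hps : p.1 = seq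
          · simp [Function.comp, hps]
          · simp [Function.comp, beq_eq_false_iff_ne.mpr hps]
        · rw [h2, hBitems]
          simp only [List.map_map]
          apply List.map_congr_left
          intro p hp
          by_cases hps : p.1 = seq
          · have hpb : (p.1 == seq) = true := beq_iff_eq.mpr hps
            have hq2 : q.2 = p.2 := by rw [huniq p hp hps]
            simp only [Function.comp, hpb, if_true]
            simp only [hq2, hps]
            exact congrArg (fun x => (seq, x)) (pvConv_snoc kc p.2 item (h3 p hp).1)
          · have hpb : (p.1 == seq) = false := beq_eq_false_iff_ne.mpr hps
            simp [Function.comp, hpb]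
        · rw [hBitems]
          have : (g.items.map (fun p => if p.1 == seq then (seq, q.2 ++ [item]) else p)).map
              Prod.fst = g.items.map Prod.fst := by
            simp only [List.map_map]
            apply List.map_congr_left
            intro p hp
            by_cases hps : p.1 = seq
            · simp [Function.comp, hps]
            · simp [Function.comp, beq_eq_false_iff_ne.mpr hps]
          rw [this]; exact hnd
        · rw [hBitems]
          intro p hp
          obtain ⟨p', hp', hpe⟩ := List.mem_map.mp hp
          by_cases hps : p'.1 = seq
          · have hpb : (p'.1 == seq) = true := beq_iff_eq.mpr hps
            rw [← hpe]; simp only [hpb, if_true]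
            exact ⟨by simp, hbrace⟩
          · have hpb : (p'.1 == seq) = false := beq_eq_false_iff_ne.mpr hps
            rw [← hpe]; simp only [hpb, Bool.false_eq_true, if_false]
            exact h3 p' hp'
    | none =>
        -- first occurrence: A appends the item, B starts a new one-element group
        have hncont : g.contains seq = false := by
          simp only [PySem.Dict.contains]
          apply List.any_eq_false.mpr
          intro p hp
          simpa using List.find?_eq_none.mp hf p hp
        have hgetD : g.getD seq [] = [] := PySem.Dict.getD_of_not_contains g [] hncont
        have hBitems : (pvGroupStep kd g item).items = g.items ++ [(seq, [item])] := by
          simp only [pvGroupStep, ← hseqdef, hbb, Bool.false_eq_true, if_false,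
            PySem.Dict.modify, hgetD, List.nil_append]
          exact PySem.Dict.items_insert_of_not_contains g _ hncont
        have hA : pvStepA kd kc stA item = (stA.1 ++ [seq], stA.2 ++ [(seq, item)]) := by
          simp [pvStepA, ← hseqdef, hfindA, hf, hbb]
        rw [hA]
        refine ⟨?_, ?_, ?_, ?_⟩
        · rw [h1, hBitems]; simp
        · rw [h2, hBitems]
          simp [pvConv]
        · rw [hBitems]
          simp only [List.map_append, List.map_cons, List.map_nil]
          refine List.Nodup.append hnd (by simp) (List.disjoint_singleton.mpr ?_)
          intro hmem
          obtain ⟨p, hp, hpe⟩ := List.mem_map.mp hmem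
          exact absurd (beq_iff_eq.mpr hpe) (by simpa using List.find?_eq_none.mp hf p hp)
        · rw [hBitems]
          intro p hp
          rcases List.mem_append.mp hp with hp | hp
          · exact h3 p hp
          · simp only [List.mem_singleton] at hp
            subst hp
            exact ⟨by simp, hbrace⟩

theorem pvFold_inv (kd kc : String) (items : List (List (String × String))) :
    ∀ stA g, pvInv kc stA g →
      pvInv kc (items.foldl (pvStepA kd kc) stA) (items.foldl (pvGroupStep kd) g) := by
  induction items with
  | nil => intro stA g h; exact h
  | cons a l ih =>
      intro stA g h
      simp only [List.foldl_cons]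
      exact ih _ _ (pvStep_inv kd kc stA g a h)

-- reading each key of l back from the converted association list recovers the converted values
theorem pvLookup_map_fst {β : Type} (l : List (String × β)) (f : β → List (String × String))
    (hnd : (l.map Prod.fst).Nodup) :
    (l.map Prod.fst).map (fun k =>
        match (l.map (fun p => (p.1, f p.2))).find? (fun p => p.1 == k) with
        | some p => p.2
        | none => ([] : List (String × String))) = l.map (fun p => f p.2) := by
  induction l with
  | nil => rfl
  | cons a l ih =>
      simp only [List.map_cons, List.nodup_cons] at hnd ⊢
      obtain ⟨hna, hnd'⟩ := hnd
      congr 1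
      · simp [List.find?]
      · rw [← ih hnd']
        apply List.map_congr_left
        intro k hk
        have hka : (a.1 == k) = false := beq_eq_false_iff_ne.mpr (fun he => hna (he ▸ hk))
        simp [List.find?, hka]

-- ===== VERDICT (by name: the statement is the Claim_ definition above) =====
theorem deduplicate_and_concat_py_spec : Claim_equal_deduplicate_and_concat_py := by
  intro lo kd kc _ _
  unfold Spec_deduplicate_and_concat_py deduplicate_and_concat_py deduplicate_and_concat_py_alt
  dsimp only
  have hinv := pvFold_inv kd kc lo ([], []) PySem.Dict.empty
    ⟨rfl, rfl, by simp [PySem.Dict.empty], by simp [PySem.Dict.empty]⟩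
  obtain ⟨h1, h2, hnd, _⟩ := hinv
  rw [h1, h2, pvLookup_map_fst _ _ hnd]
  simp only [PySem.Dict.values, List.map_map]
  rfl
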